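-- pv_equiv track=rewrite | github.com/rakshittrattha/encoding-singnal | AMI.py | encode_ami
-- ===== SOURCE A (Python) =====
-- def encode_ami(bitstream):
--     encoded_signal = []
--     current_polarity = 1  # Initial polarity for '1' bits
--
--     for bit in bitstream:
--         if bit == '0':
--             # A '0' bit is represented as 0 (no signal)
--             encoded_signal.append(0)
--         elif bit == '1':
--             # A '1' bit alternates between positive and negative levels
--             encoded_signal.append(current_polarity)
--             current_polarity = -current_polarity  # Invert polarity for next '1'
--
--     return encoded_signal
-- ===== SOURCE B (Python) =====
-- def encode_ami(bitstream):
--     valid = [b for b in bitstream if b == '0' or b == '1']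
--     ones = [i for i, b in enumerate(valid) if b == '1']
--     result = [0] * len(valid)
--     for k, i in enumerate(ones):
--         result[i] = 1 if k % 2 == 0 else -1
--     return result
-- ===== Notes on version B (the rewrite author's own statement) =====
-- stated objective: alternative
-- what changed: Instead of one stateful pass appending 0/±polarity per character, B filters the valid bits, collects the indices of '1's, allocates a zero list and writes alternating +1/-1 into the one-positions by enumeration parity.
import Mathlib
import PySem

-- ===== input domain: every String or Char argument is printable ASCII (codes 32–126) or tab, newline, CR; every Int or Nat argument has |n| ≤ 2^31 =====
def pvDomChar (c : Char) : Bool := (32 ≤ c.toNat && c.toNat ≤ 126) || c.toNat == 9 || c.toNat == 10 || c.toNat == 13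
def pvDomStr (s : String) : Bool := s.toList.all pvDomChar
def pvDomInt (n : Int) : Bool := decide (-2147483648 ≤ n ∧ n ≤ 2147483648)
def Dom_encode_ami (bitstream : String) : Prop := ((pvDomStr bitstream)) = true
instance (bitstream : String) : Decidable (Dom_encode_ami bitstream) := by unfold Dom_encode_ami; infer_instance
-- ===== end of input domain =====

-- B replaces A's single stateful polarity-flipping pass by: filter valid bits, list the
-- one-positions, zero-fill, then write alternating ±1 at those positions (objective: alternative).

-- ===== PORT A =====
def encode_ami (bitstream : String) : List Int :=
  (bitstream.toList.foldl
    (fun (st : List Int × Int) bit =>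
      if bit == '0' then (st.1 ++ [0], st.2)
      else if bit == '1' then (st.1 ++ [st.2], -st.2)
      else st) ([], 1)).1

-- ===== PORT B =====
def encode_ami_alt (bitstream : String) : List Int :=
  let valid := bitstream.toList.filter (fun b => b == '0' || b == '1')
  let ones := ((PySem.List.enumerate valid).filter (fun p => p.2 == '1')).map (fun p => p.1)
  (PySem.List.enumerate ones).foldl
    (fun res p => PySem.List.pySetD res p.2 (if p.1 % 2 = 0 then 1 else -1))
    (List.replicate valid.length (0 : Int))

-- ===== PRECONDITION & SPEC =====
def Spec_encode_ami (bitstream : String) (out : List Int) : Prop := out = encode_ami_alt bitstream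
instance (bitstream : String) (out : List Int) : Decidable (Spec_encode_ami bitstream out) := by unfold Spec_encode_ami; infer_instance

-- ===== CLAIM (what is proved, stated in full; the proofs are below) =====
def Claim_equal_encode_ami : Prop := ∀ (bitstream : String), Dom_encode_ami bitstream → Spec_encode_ami bitstream (encode_ami bitstream)

-- ===== LEMMAS AND PROOFS =====

-- reference recursion: A's loop body as structural recursion on the characters
def amiG : List Char → Int → List Int
  | [], _ => []
  | c :: cs, p =>
    if c = '0' then 0 :: amiG cs p
    else if c = '1' then p :: amiG cs (-p)
    else amiG cs p

-- indices (within the valid list) of the '1' bits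
def onesIdx : List Char → List Int
  | [] => []
  | c :: cs => if c = '1' then 0 :: (onesIdx cs).map (· + 1) else (onesIdx cs).map (· + 1)

-- B's write loop as structural recursion carrying the enumeration counter
def setFold : List Int → Int → List Int → List Int
  | [], _, res => res
  | i :: is, k, res => setFold is (k + 1) (PySem.List.pySetD res i (if k % 2 = 0 then 1 else -1))

-- alternating-parity reference for B
def amiGK : List Char → Int → List Int
  | [], _ => []
  | c :: cs, k =>
    if c = '1' then (if k % 2 = 0 then (1 : Int) else -1) :: amiGK cs (k + 1)
    else 0 :: amiGK cs k

theorem amiG_foldl (v : List Char) : ∀ (acc : List Int) (p : Int),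
    (v.foldl (fun (st : List Int × Int) bit =>
      if bit == '0' then (st.1 ++ [0], st.2)
      else if bit == '1' then (st.1 ++ [st.2], -st.2)
      else st) (acc, p)).1 = acc ++ amiG v p := by
  induction v with
  | nil => simp [amiG]
  | cons c cs ih =>
    intro acc p
    rw [List.foldl_cons]
    by_cases h0 : c = '0'
    · rw [if_pos (show (c == '0') = true by simp [h0]), ih]
      simp [amiG, h0]
    · by_cases h1 : c = '1'
      · rw [if_neg (show ¬ (c == '0') = true by simp [h0]),
          if_pos (show (c == '1') = true by simp [h1]), ih]
        simp [amiG, h1]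
      · rw [if_neg (show ¬ (c == '0') = true by simp [h0]),
          if_neg (show ¬ (c == '1') = true by simp [h1]), ih]
        simp [amiG, h0, h1]

theorem amiG_filter (v : List Char) : ∀ (p : Int),
    amiG v p = amiG (v.filter (fun b => b == '0' || b == '1')) p := by
  induction v with
  | nil => intro p; rfl
  | cons c cs ih =>
    intro p
    by_cases h0 : c = '0'
    · simp [h0, amiG, List.filter_cons, ih]
    · by_cases h1 : c = '1'
      · simp [h0, h1, amiG, ih]
      · simp [h0, h1, amiG, ih]

theorem ones_eq (v : List Char) : ∀ (s : Int),
    ((PySem.List.enumerate v s).filter (fun p => p.2 == '1')).map (fun p => p.1)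
      = (onesIdx v).map (· + s) := by
  induction v with
  | nil => intro s; simp [PySem.List.enumerate_nil, onesIdx]
  | cons c cs ih =>
    intro s
    by_cases h1 : c = '1' <;>
      simp [PySem.List.enumerate_cons, h1, onesIdx, ih (s + 1)] <;>
      first
        | rfl
        | (intro a _; ring)

theorem setFold_foldl (is : List Int) : ∀ (k : Int) (res : List Int),
    (PySem.List.enumerate is k).foldl
        (fun res p => PySem.List.pySetD res p.2 (if p.1 % 2 = 0 then 1 else -1)) res
      = setFold is k res := by
  induction is with
  | nil => intro k res; simp [PySem.List.enumerate_nil, setFold]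
  | cons i is ih =>
    intro k res
    rw [PySem.List.enumerate_cons, List.foldl_cons, ih]
    rfl

theorem onesIdx_nonneg (v : List Char) : ∀ i ∈ onesIdx v, 0 ≤ i := by
  induction v with
  | nil => simp [onesIdx]
  | cons c cs ih =>
    by_cases h1 : c = '1' <;> simp [onesIdx, h1] <;> intro i hi <;>
      have := ih i hi <;> omega

theorem setFold_shift (is : List Int) (hnn : ∀ i ∈ is, 0 ≤ i) :
    ∀ (k : Int) (x : Int) (res : List Int),
    setFold (is.map (· + 1)) k (x :: res) = x :: setFold is k res := by
  induction is with
  | nil => intro k x res; simp [setFold]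
  | cons i is ih =>
    intro k x res
    have hi : (0 : Int) ≤ i := hnn i (by simp)
    have hnn' : ∀ j ∈ is, 0 ≤ j := fun j hj => hnn j (by simp [hj])
    simp only [List.map_cons, setFold]
    rw [PySem.List.pySetD_of_nonneg _ _ (show (0 : Int) ≤ i + 1 by omega),
      PySem.List.pySetD_of_nonneg _ _ hi]
    have ht : (i + 1).toNat = i.toNat + 1 := by omega
    rw [ht]
    exact ih hnn' (k + 1) x (res.set i.toNat (if k % 2 = 0 then 1 else -1))

theorem setFold_onesIdx (v : List Char) : ∀ (k : Int),
    setFold (onesIdx v) k (List.replicate v.length (0 : Int)) = amiGK v k := by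
  induction v with
  | nil => intro k; simp [onesIdx, setFold, amiGK]
  | cons c cs ih =>
    intro k
    have hnn := onesIdx_nonneg cs
    by_cases h1 : c = '1'
    · simp only [onesIdx, h1, if_pos, List.length_cons, List.replicate_succ, setFold, amiGK]
      rw [PySem.List.pySetD_of_nonneg _ _ (show (0 : Int) ≤ 0 by omega)]
      simp only [Int.toNat_zero, List.set]
      rw [setFold_shift _ hnn, ih]
    · simp only [onesIdx, h1, if_neg, List.length_cons, List.replicate_succ, amiGK,
        not_false_iff]
      rw [setFold_shift _ hnn, ih]

theorem amiGK_eq_amiG (v : List Char) (hv : ∀ c ∈ v, c = '0' ∨ c = '1') :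
    ∀ (k : Int), 0 ≤ k → amiGK v k = amiG v (if k % 2 = 0 then 1 else -1) := by
  induction v with
  | nil => intro k _; rfl
  | cons c cs ih =>
    intro k hk
    have hc := hv c (by simp)
    have hcs : ∀ c ∈ cs, c = '0' ∨ c = '1' := fun c hc => hv c (by simp [hc])
    rcases hc with h0 | h1
    · simp [amiGK, amiG, h0, ih hcs k hk]
    · have hpar : ((k + 1) % 2 = 0) ↔ ¬ (k % 2 = 0) := by omega
      by_cases he : k % 2 = 0
      · simp [amiGK, amiG, h1, he, ih hcs (k + 1) (by omega), hpar]
      · simp [amiGK, amiG, h1, he, ih hcs (k + 1) (by omega), hpar]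

theorem alt_eq (s : String) :
    encode_ami_alt s =
      (PySem.List.enumerate
          (((PySem.List.enumerate
                (s.toList.filter (fun b => b == '0' || b == '1'))).filter
              (fun p => p.2 == '1')).map (fun p => p.1))).foldl
        (fun res p => PySem.List.pySetD res p.2 (if p.1 % 2 = 0 then 1 else -1))
        (List.replicate (s.toList.filter (fun b => b == '0' || b == '1')).length (0 : Int)) :=
  rfl

-- ===== VERDICT (by name: the statement is the Claim_ definition above) =====
theorem encode_ami_spec : Claim_equal_encode_ami := by
  intro s _
  show encode_ami s = encode_ami_alt s
  unfold encode_ami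
  rw [alt_eq, amiG_foldl, List.nil_append, ones_eq]
  have hmap : ((onesIdx (s.toList.filter (fun b => b == '0' || b == '1'))).map (· + (0 : Int)))
      = onesIdx (s.toList.filter (fun b => b == '0' || b == '1')) := by
    simp
  rw [hmap, setFold_foldl, setFold_onesIdx]
  rw [amiG_filter]
  have hv : ∀ c ∈ s.toList.filter (fun b => b == '0' || b == '1'), c = '0' ∨ c = '1' := by
    intro c hc
    have := List.of_mem_filter hc
    simpa using this
  rw [amiGK_eq_amiG _ hv 0 (by norm_num)]
  norm_num
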